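-- pv_equiv track=rewrite | github.com/jonDomino/nba_scanner | data_build/top_of_book.py | get_no_bid_top_and_liquidity
-- ===== SOURCE A (Python) =====
-- from typing import Dict, Any, Optional, Tuple
--
-- def get_no_bid_top_and_liquidity(orderbook: Dict[str, Any]) -> Tuple[Optional[int], Optional[int], Dict[int, int]]:
--     """
--     Extract top NO bid price and its liquidity from orderbook.
--
--     Similar to get_yes_bid_top_and_liquidity but for NO side.
--
--     Args:
--         orderbook: Kalshi orderbook dict with "no" bid array (format: [[price_cents, qty], ...])
--
--     Returns:
--         (no_bid_top_c, no_bid_top_liq, no_bids_by_price_dict)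
--         - no_bid_top_c: Maximum NO bid price in cents, or None
--         - no_bid_top_liq: Total liquidity (quantity) at top NO bid price, or None
--         - no_bids_by_price_dict: Dict mapping price -> total quantity for all NO bid levels
--     """
--     no_bids = orderbook.get("no") or []
--
--     if not no_bids or not isinstance(no_bids, list):
--         return (None, None, {})
--
--     # Find max NO bid price and accumulate quantities by price
--     no_bid_top_c = None
--     no_bids_by_price = {}
--
--     for bid in no_bids:
--         if isinstance(bid, list) and len(bid) >= 2:
--             price_cents = int(bid[0])
--             qty = int(bid[1])
--
--             # Track max price
--             if no_bid_top_c is None or price_cents > no_bid_top_c: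
--                 no_bid_top_c = price_cents
--
--             # Accumulate quantities by price (in case multiple entries at same price)
--             if price_cents in no_bids_by_price:
--                 no_bids_by_price[price_cents] += qty
--             else:
--                 no_bids_by_price[price_cents] = qty
--
--     # Get liquidity at top price
--     no_bid_top_liq = no_bids_by_price.get(no_bid_top_c, 0) if no_bid_top_c is not None else None
--
--     return (no_bid_top_c, no_bid_top_liq, no_bids_by_price)
-- ===== SOURCE B (Python) =====
-- def get_no_bid_top_and_liquidity(orderbook):
--     no_bids = orderbook.get("no") or []
--     if not isinstance(no_bids, list):
--         return (None, None, {})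
--     # stage 1: validate and coerce into a flat list of (price, qty) pairs
--     pairs = [(int(b[0]), int(b[1])) for b in no_bids
--              if isinstance(b, list) and len(b) >= 2]
--     # stage 2: distinct prices in first-occurrence order
--     seen = []
--     for p, _ in pairs:
--         if p not in seen:
--             seen.append(p)
--     if not seen:
--         return (None, None, {})
--     # stage 3: top price, liquidity and the dict all read off the pairs list
--     top = max(seen)
--     liq = sum(q for p, q in pairs if p == top)
--     return (top, liq, {p: sum(q for pp, q in pairs if pp == p) for p in seen})
-- ===== Notes on version B (the rewrite author's own statement) =====
-- stated objective: alternative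
-- what changed: B replaces A's single accumulating loop (running max + dict of running totals) with staged passes over a materialised (price, qty) pair list: an ordered distinct-price list, max() over it, and liquidity and the dict computed as filter-sums over the pairs; no running dict or inline max is maintained.
import Mathlib
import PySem

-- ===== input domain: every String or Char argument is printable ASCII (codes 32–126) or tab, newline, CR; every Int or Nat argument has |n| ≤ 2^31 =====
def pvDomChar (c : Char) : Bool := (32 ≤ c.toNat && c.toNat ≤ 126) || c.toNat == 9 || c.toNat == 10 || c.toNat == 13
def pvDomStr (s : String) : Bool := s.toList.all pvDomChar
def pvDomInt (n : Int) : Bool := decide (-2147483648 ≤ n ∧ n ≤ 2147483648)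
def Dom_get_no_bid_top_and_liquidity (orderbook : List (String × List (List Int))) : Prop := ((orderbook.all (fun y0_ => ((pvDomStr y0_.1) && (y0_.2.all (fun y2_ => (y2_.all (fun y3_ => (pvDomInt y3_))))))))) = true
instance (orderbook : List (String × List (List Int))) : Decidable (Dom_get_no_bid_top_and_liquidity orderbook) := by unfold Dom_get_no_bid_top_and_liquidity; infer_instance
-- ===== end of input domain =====

-- B computes the same (top price, liquidity, price->qty dict) but by staged passes over a
-- materialised (price, qty) pair list — ordered distinct prices, max over them, filter-sums —
-- instead of A's single loop maintaining a running max and a dict of running totals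
-- (objective: alternative; not faster).


-- ===== PORT A =====
-- literal port of A: one loop tracking the running max price AND accumulating quantities,
-- then liquidity via dict.get(top, 0).  isinstance checks are vacuous under the Lean types.
def get_no_bid_top_and_liquidity (orderbook : List (String × List (List Int))) : Option Int × Option Int × (List (Int × Int)) :=
  -- no_bids = orderbook.get("no") or []   (a falsy some [] also yields [])
  let no_bids := ((PySem.Dict.mk orderbook).get? "no").getD []
  if no_bids = [] then (none, none, [])
  else
    let st := no_bids.foldl (fun (st : Option Int × PySem.Dict Int Int) bid =>
      if 2 ≤ bid.length then
        -- bid[0], bid[1] are in range because len(bid) ≥ 2; int() on an int is the identity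
        let price := bid.getD 0 0
        let qty := bid.getD 1 0
        let t' := match st.1 with
          | none => some price
          | some tv => if price > tv then some price else some tv
        let d' := if st.2.contains price then st.2.modify price 0 (· + qty) else st.2.insert price qty
        (t', d')
      else st) (none, PySem.Dict.empty)
    let liq := match st.1 with
      | none => (none : Option Int)
      | some tv => some (st.2.getD tv 0)
    (st.1, liq, st.2.items)

-- ===== PORT B =====
-- literal port of B: stage 1 builds the validated (price, qty) pair list; stage 2 the distinct
-- prices in first-occurrence order; then max(seen), and liquidity / the dict as filter-sums.
-- The 'none' branch of the match is exactly Source B's 'if not seen: return (None, None, {})'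
-- (max? is none iff seen = []).
def get_no_bid_top_and_liquidity_alt (orderbook : List (String × List (List Int))) : Option Int × Option Int × (List (Int × Int)) :=
  let no_bids := ((PySem.Dict.mk orderbook).get? "no").getD []
  let pairs := (no_bids.filter (fun b => decide (2 ≤ b.length))).map (fun b => (b.getD 0 0, b.getD 1 0))
  let seen := pairs.foldl (fun (s : List Int) x => if x.1 ∈ s then s else s ++ [x.1]) []
  match PySem.List.max? seen (fun x => x) with
  | none => (none, none, [])
  | some top =>
    (some top, some (((pairs.filter (fun x => x.1 == top)).map Prod.snd).sum),
     seen.map (fun p => (p, ((pairs.filter (fun x => x.1 == p)).map Prod.snd).sum)))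

-- ===== PRECONDITION & SPEC =====
def Spec_get_no_bid_top_and_liquidity (orderbook : List (String × List (List Int))) (out : Option Int × Option Int × (List (Int × Int))) : Prop := out = get_no_bid_top_and_liquidity_alt orderbook
instance (orderbook : List (String × List (List Int))) (out : Option Int × Option Int × (List (Int × Int))) : Decidable (Spec_get_no_bid_top_and_liquidity orderbook out) := by unfold Spec_get_no_bid_top_and_liquidity; infer_instance

-- ===== CLAIM =====
def Claim_equal_get_no_bid_top_and_liquidity : Prop := ∀ (orderbook : List (String × List (List Int))), Dom_get_no_bid_top_and_liquidity orderbook → Spec_get_no_bid_top_and_liquidity orderbook (get_no_bid_top_and_liquidity orderbook)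

-- ===== LEMMAS AND PROOFS =====

-- max over keys after appending a new key
lemma max_append_singleton (l : List Int) (x : Int) :
    PySem.List.max? (l ++ [x]) (fun y => y) =
      (match PySem.List.max? l (fun y => y) with
        | none => some x
        | some m => if x > m then some x else some m) := by
  cases l with
  | nil => rfl
  | cons y t =>
    rw [List.cons_append, PySem.List.max?_id_cons, PySem.List.max?_id_cons, List.foldl_append]
    simp only [List.foldl_cons, List.foldl_nil, gt_iff_lt]
    by_cases hlt : t.foldl max y < x
    · simp [hlt, max_eq_right hlt.le]
    · simp [hlt, max_eq_left (not_lt.mp hlt)]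

-- A's dict update step is an insert of the accumulated total
lemma dict_step_eq (d : PySem.Dict Int Int) (p q : Int) :
    (if d.contains p then d.modify p 0 (· + q) else d.insert p q)
      = d.insert p (d.getD p 0 + q) := by
  rcases h : d.contains p with _ | _
  · rw [PySem.Dict.getD_of_not_contains (h := h), zero_add]
    simp
  · rfl

-- loop invariant: A's running max is the max of the keys of the dict the loop builds
lemma loop_eq (bids : List (List Int)) (t : Option Int) (d : PySem.Dict Int Int)
    (h : t = PySem.List.max? d.keys (fun x => x)) :
    bids.foldl (fun (st : Option Int × PySem.Dict Int Int) bid =>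
      if 2 ≤ bid.length then
        let price := bid.getD 0 0
        let qty := bid.getD 1 0
        let t' := match st.1 with
          | none => some price
          | some tv => if price > tv then some price else some tv
        let d' := if st.2.contains price then st.2.modify price 0 (· + qty) else st.2.insert price qty
        (t', d')
      else st) (t, d)
      = (PySem.List.max? (bids.foldl (fun (d : PySem.Dict Int Int) bid =>
            if 2 ≤ bid.length then
              d.insert (bid.getD 0 0) (d.getD (bid.getD 0 0) 0 + bid.getD 1 0)
            else d) d).keys (fun x => x),
         bids.foldl (fun (d : PySem.Dict Int Int) bid =>
            if 2 ≤ bid.length then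
              d.insert (bid.getD 0 0) (d.getD (bid.getD 0 0) 0 + bid.getD 1 0)
            else d) d) := by
  induction bids generalizing t d with
  | nil => simp [← h]
  | cons bid rest ih =>
    simp only [List.foldl_cons]
    by_cases hl : 2 ≤ bid.length
    · simp only [if_pos hl]
      rw [dict_step_eq]
      apply ih
      set p := bid.getD 0 0 with hp
      rcases hc : d.contains p with _ | _
      · rw [PySem.Dict.keys_insert_of_not_contains _ _ hc, max_append_singleton, ← h]
      · rw [PySem.Dict.keys_insert_of_contains _ _ hc, ← h]
        have hmem : p ∈ d.keys := (PySem.Dict.contains_iff_mem_keys d p).mp hc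
        rcases hm : PySem.List.max? d.keys (fun x => x) with _ | m
        · exact absurd ((PySem.List.max?_eq_none_iff _ _).mp hm ▸ hmem) (List.not_mem_nil)
        · have hle : p ≤ m := PySem.List.max?_isMax hm p hmem
          rw [h, hm]
          simp [not_lt.mpr hle]
    · simp only [if_neg hl]
      exact ih t d h

-- A's guarded fold over the raw bid lists is B's plain fold over the validated pair list
lemma fold_guard_eq_fold_pairs (l : List (List Int)) (d : PySem.Dict Int Int) :
    l.foldl (fun (d : PySem.Dict Int Int) bid =>
        if 2 ≤ bid.length then
          d.insert (bid.getD 0 0) (d.getD (bid.getD 0 0) 0 + bid.getD 1 0)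
        else d) d
    = ((l.filter (fun b => decide (2 ≤ b.length))).map (fun b => (b.getD 0 0, b.getD 1 0))).foldl
        (fun (d : PySem.Dict Int Int) x => d.insert x.1 (d.getD x.1 0 + x.2)) d := by
  induction l generalizing d with
  | nil => rfl
  | cons b rest ih =>
    by_cases hl : 2 ≤ b.length
    · rw [List.foldl_cons, if_pos hl, List.filter_cons_of_pos (by simpa using hl),
        List.map_cons, List.foldl_cons]
      exact ih _
    · rw [List.foldl_cons, if_neg hl, List.filter_cons_of_neg (by simpa using hl)]
      exact ih d

-- value stored at v by the accumulating fold = previous value + sum of matching quantities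
lemma getD_pairs_fold (P : List (Int × Int)) (d : PySem.Dict Int Int) (v : Int) :
    (P.foldl (fun (d : PySem.Dict Int Int) x => d.insert x.1 (d.getD x.1 0 + x.2)) d).getD v 0
      = d.getD v 0 + ((P.filter (fun x => x.1 == v)).map Prod.snd).sum := by
  induction P generalizing d with
  | nil => simp
  | cons x rest ih =>
    simp only [List.foldl_cons, ih]
    by_cases hv : x.1 = v
    · simp [hv]
      ring
    · simp [PySem.Dict.getD_insert, hv, Ne.symm hv]

-- Source B's 'seen' loop builds exactly the ordered set of first components
lemma seen_eq_update (P : List (Int × Int)) (s : List Int) :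
    P.foldl (fun (s : List Int) x => if x.1 ∈ s then s else s ++ [x.1]) s
      = PySem.Set.update s (P.map Prod.fst) := by
  rw [PySem.Set.update_map_eq_foldl_add]
  simp [PySem.Set.add_eq_ite]

-- ===== VERDICT =====
theorem get_no_bid_top_and_liquidity_spec : Claim_equal_get_no_bid_top_and_liquidity := by
  intro orderbook _
  unfold Spec_get_no_bid_top_and_liquidity get_no_bid_top_and_liquidity get_no_bid_top_and_liquidity_alt
  generalize ((PySem.Dict.mk orderbook).get? "no").getD ([] : List (List Int)) = nb
  by_cases he : nb = []
  · subst he; rfl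
  · rw [if_neg he, loop_eq nb none PySem.Dict.empty rfl, fold_guard_eq_fold_pairs]
    -- zeta-reduce both sides (definitional) so the pair list appears literally, then abstract it
    show (PySem.List.max? (((nb.filter (fun b => decide (2 ≤ b.length))).map (fun b => (b.getD 0 0, b.getD 1 0))).foldl
            (fun (d : PySem.Dict Int Int) x => d.insert x.1 (d.getD x.1 0 + x.2)) PySem.Dict.empty).keys (fun x => x),
          (match PySem.List.max? (((nb.filter (fun b => decide (2 ≤ b.length))).map (fun b => (b.getD 0 0, b.getD 1 0))).foldl
              (fun (d : PySem.Dict Int Int) x => d.insert x.1 (d.getD x.1 0 + x.2)) PySem.Dict.empty).keys (fun x => x) with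
            | none => (none : Option Int)
            | some tv => some ((((nb.filter (fun b => decide (2 ≤ b.length))).map (fun b => (b.getD 0 0, b.getD 1 0))).foldl
                (fun (d : PySem.Dict Int Int) x => d.insert x.1 (d.getD x.1 0 + x.2)) PySem.Dict.empty).getD tv 0)),
          (((nb.filter (fun b => decide (2 ≤ b.length))).map (fun b => (b.getD 0 0, b.getD 1 0))).foldl
            (fun (d : PySem.Dict Int Int) x => d.insert x.1 (d.getD x.1 0 + x.2)) PySem.Dict.empty).items)
        = match PySem.List.max? (((nb.filter (fun b => decide (2 ≤ b.length))).map (fun b => (b.getD 0 0, b.getD 1 0))).foldl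
              (fun (s : List Int) x => if x.1 ∈ s then s else s ++ [x.1]) []) (fun x => x) with
          | none => (none, none, [])
          | some top =>
            (some top, some ((((nb.filter (fun b => decide (2 ≤ b.length))).map (fun b => (b.getD 0 0, b.getD 1 0))).filter
                (fun x => x.1 == top)).map Prod.snd).sum,
             (((nb.filter (fun b => decide (2 ≤ b.length))).map (fun b => (b.getD 0 0, b.getD 1 0))).foldl
                (fun (s : List Int) x => if x.1 ∈ s then s else s ++ [x.1]) []).map
               (fun p => (p, ((((nb.filter (fun b => decide (2 ≤ b.length))).map (fun b => (b.getD 0 0, b.getD 1 0))).filter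
                  (fun x => x.1 == p)).map Prod.snd).sum)))
    generalize (nb.filter (fun b => decide (2 ≤ b.length))).map (fun b => (b.getD 0 0, b.getD 1 0)) = P
    set D := P.foldl (fun (d : PySem.Dict Int Int) x => d.insert x.1 (d.getD x.1 0 + x.2)) PySem.Dict.empty with hD
    have hkeys : D.keys = PySem.Set.update PySem.Dict.empty.keys (P.map Prod.fst) :=
      PySem.Dict.keys_foldl_insert_key P Prod.fst (fun d x => d.getD x.1 0 + x.2) PySem.Dict.empty
    have hseen : P.foldl (fun (s : List Int) x => if x.1 ∈ s then s else s ++ [x.1]) [] = D.keys := by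
      rw [seen_eq_update, hkeys, PySem.Dict.keys_empty]
    have hnd : D.keys.Nodup :=
      PySem.Dict.nodup_keys_foldl_insert_key P Prod.fst (fun d x => d.getD x.1 0 + x.2)
        PySem.Dict.empty (by rw [PySem.Dict.keys_empty]; exact List.nodup_nil)
    have hgetD : ∀ v, D.getD v 0 = ((P.filter (fun x => x.1 == v)).map Prod.snd).sum := by
      intro v; rw [hD, getD_pairs_fold]; simp
    have hitems : D.items = D.keys.map (fun p => (p, ((P.filter (fun x => x.1 == p)).map Prod.snd).sum)) := by
      rw [PySem.Dict.items_eq_map_keys D hnd 0]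
      exact List.map_congr_left (fun k _ => by rw [hgetD])
    rcases hm : PySem.List.max? D.keys (fun x => x) with _ | top
    · have hk : D.keys = [] := (PySem.List.max?_eq_none_iff _ _).mp hm
      rw [hseen, hm, hitems, hk]
      simp
    · rw [hseen, hm, hitems]
      simp only [hgetD]
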